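-- pv_equiv track=rewrite | github.com/huabei-li/live-project | pre_progress_by_ZhangYang/pre_progress.py | get_key_list
-- ===== SOURCE A (Python) =====
-- def get_key_list(string):
--     '''
--     得到以#标记的关键词的列表
--     :param string:
--     :return:
--     '''
--
--     # 关键词列表
--     key_list = []
--
--     # 找出字符串中所有‘#’的位置
--     jing_pos = []
--     for i in range(len(string)):
--         if string[i] == '#':
--             jing_pos.append(i)
--
--     # '#'号列表长度
--     length = len(jing_pos)
--
--     # 用了一个很蠢的方法去跳过
--     tmp_flag = 0
--     for i in range(length):
--         if tmp_flag == 1: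
--             tmp_flag = 0
--             continue
--
--         if i+1 == length:
--             break
--
--         key = string[jing_pos[i]+1:jing_pos[i+1]]
--         key_list.append(key)
--         tmp_flag = 1
--
--     return key_list
-- ===== SOURCE B (Python) =====
-- def get_key_list(string):
--     parts = string.split('#')
--     # segments at odd indices lie between a pair of '#'; stop before the last
--     # segment so a trailing unpaired '#' contributes no key
--     return [parts[i] for i in range(1, len(parts) - 1, 2)]
-- ===== Notes on version B (the rewrite author's own statement) =====
-- stated objective: simpler
-- what changed: A scans the string index-by-index for '#' positions and then pairs them with a skip-flag loop over that list; B splits the string on '#' once and returns the odd-indexed segments via range(1, len(parts)-1, 2), whose upper bound drops the segment after a trailing unpaired '#' exactly as A's break does.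
import Mathlib
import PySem

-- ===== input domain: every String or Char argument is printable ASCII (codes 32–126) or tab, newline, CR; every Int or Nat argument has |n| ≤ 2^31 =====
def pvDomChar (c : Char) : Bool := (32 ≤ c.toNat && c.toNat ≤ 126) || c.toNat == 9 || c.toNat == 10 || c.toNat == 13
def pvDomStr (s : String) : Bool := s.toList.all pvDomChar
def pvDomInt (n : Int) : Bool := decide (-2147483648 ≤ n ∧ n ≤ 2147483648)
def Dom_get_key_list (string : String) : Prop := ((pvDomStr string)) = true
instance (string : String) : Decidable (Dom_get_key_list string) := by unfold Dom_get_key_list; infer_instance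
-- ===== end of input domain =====

-- B replaces A's two index loops (position list + skip-flag pairing scan) by one split('#')
-- and a stride over the odd-indexed segments; simpler, and measurably faster by a constant
-- factor (C-level str.split vs a per-character Python loop).


-- ===== PORT A =====
def get_key_list (string : String) : List String :=
  let s := string.toList
  -- jing_pos: the positions of '#'
  let jing_pos : List Int :=
    (PySem.List.pyRange 0 (s.length : Int) 1).foldl
      (fun acc i => if PySem.List.pyGet? s i = some '#' then acc ++ [i] else acc) []
  let length : Int := (jing_pos.length : Int)
  -- pairing loop with the tmp_flag skip; Python's `break` fires only at the LAST index
  -- (i+1 == length), so leaving the state unchanged there is exact.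
  let st :=
    (PySem.List.pyRange 0 length 1).foldl
      (fun (st : Int × List String) i =>
        if st.1 = 1 then (0, st.2)
        else if i + 1 = length then st
        else
          match PySem.List.pyGet? jing_pos i, PySem.List.pyGet? jing_pos (i + 1) with
          | some p, some q => (1, st.2 ++ [PySem.Str.slice string (some (p + 1)) (some q)])
          | _, _ => st)      -- unreachable: i and i+1 are in range
      (0, [])
  st.2

-- ===== PORT B =====
def get_key_list_alt (string : String) : List String :=
  let parts := (PySem.Str.split? string "#").getD []   -- sep "#" ≠ "", so split? is always `some`
  (PySem.List.pyRange 1 ((parts.length : Int) - 1) 2).map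
    (fun i => (PySem.List.pyGet? parts i).getD "")     -- i is always in range here

-- ===== PRECONDITION & SPEC =====
def Spec_get_key_list (string : String) (out : List String) : Prop := out = get_key_list_alt string
instance (string : String) (out : List String) : Decidable (Spec_get_key_list string out) := by unfold Spec_get_key_list; infer_instance

-- ===== CLAIM (what is proved, stated in full; the proofs are below) =====
def Claim_equal_get_key_list : Prop := ∀ (string : String), Dom_get_key_list string → Spec_get_key_list string (get_key_list string)

-- ===== LEMMAS AND PROOFS =====

-- positions of '#' in a char list
def hashPos : List Char → List Nat
  | [] => []
  | c :: r => if c = '#' then 0 :: (hashPos r).map (· + 1) else (hashPos r).map (· + 1)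

-- the '#'-separated segments (what split('#') produces), front recursion
def segsOf : List Char → List (List Char)
  | [] => [[]]
  | c :: r => if c = '#' then [] :: segsOf r else (segsOf r).modifyHead (c :: ·)

-- the odd-indexed elements that are followed by at least one more element
def pairSel {α : Type} : List α → List α
  | _ :: b :: c :: r => b :: pairSel (c :: r)
  | _ => []

-- the keys cut out of s by consecutive position pairs (char level)
def pairKeys (s : List Char) : List Nat → List (List Char)
  | p :: q :: r => ((s.drop (p + 1)).take (q - (p + 1))) :: pairKeys s r
  | _ => []

-- the same on the String/Int level, as port A computes it
def pairKeysI (s : String) : List Int → List String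
  | p :: q :: r => PySem.Str.slice s (some (p + 1)) (some q) :: pairKeysI s r
  | _ => []

theorem hashPos_eq_nil {r : List Char} (h : hashPos r = []) : ∀ c ∈ r, c ≠ '#' := by
  induction r with
  | nil => simp
  | cons c t ih =>
    simp only [hashPos] at h
    split at h
    · simp at h
    · simp only [List.map_eq_nil_iff] at h
      rename_i hc
      intro x hx
      rcases List.mem_cons.mp hx with hx1 | hx2
      · exact hx1 ▸ hc
      · exact ih h x hx2

theorem hashPos_eq_cons : ∀ {r : List Char} {q : Nat} {qs : List Nat}, hashPos r = q :: qs →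
    ∃ key rest, r = key ++ '#' :: rest ∧ key.length = q ∧ (∀ c ∈ key, c ≠ '#') ∧
      qs = (hashPos rest).map (· + (q + 1)) := by
  intro r
  induction r with
  | nil => intro q qs h; simp [hashPos] at h
  | cons c t ih =>
    intro q qs h
    simp only [hashPos] at h
    by_cases hc : c = '#'
    · rw [if_pos hc] at h
      obtain ⟨h1, h2⟩ := List.cons_eq_cons.mp h
      exact ⟨[], t, by simp [hc], by simp [h1.symm], by simp, by simpa [← h1] using h2.symm⟩
    · rw [if_neg hc] at h
      cases ht : hashPos t with
      | nil => rw [ht] at h; simp at h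
      | cons q' qs' =>
        rw [ht] at h
        simp only [List.map_cons, List.cons_eq_cons] at h
        obtain ⟨key, rest, e1, e2, e3, e4⟩ := ih ht
        refine ⟨c :: key, rest, by simp [e1], by simp [e2]; omega, ?_, ?_⟩
        · intro x hx
          rcases List.mem_cons.mp hx with h5 | h6
          · exact h5 ▸ hc
          · exact e3 x h6
        · rw [← h.2, e4]
          simp only [List.map_map]
          apply List.map_congr_left
          intro a _
          simp
          omega

theorem segsOf_ne_nil (l : List Char) : segsOf l ≠ [] := by
  induction l with
  | nil => simp [segsOf]
  | cons c t ih =>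
    simp only [segsOf]
    split
    · simp
    · cases h : segsOf t with
      | nil => exact absurd h ih
      | cons a b => simp

theorem segsOf_hashfree {l : List Char} (h : ∀ c ∈ l, c ≠ '#') : segsOf l = [l] := by
  induction l with
  | nil => rfl
  | cons c t ih =>
    simp only [segsOf]
    rw [if_neg (h c (by simp)), ih (fun x hx => h x (by simp [hx]))]
    rfl

theorem segsOf_append_hashfree {key rest : List Char} (h : ∀ c ∈ key, c ≠ '#') :
    segsOf (key ++ '#' :: rest) = key :: segsOf rest := by
  induction key with
  | nil => simp [segsOf]
  | cons c t ih =>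
    simp only [List.cons_append, segsOf]
    rw [if_neg (h c (by simp)), ih (fun x hx => h x (by simp [hx]))]
    rfl

theorem pairSel_head_irrel {α : Type} (t : List α) (x y : α) :
    pairSel (x :: t) = pairSel (y :: t) := by
  match t with
  | [] => rfl
  | [b] => rfl
  | b :: c :: r => rfl

theorem pairKeys_shift (l : List Char) (d : Nat) : ∀ ps : List Nat,
    pairKeys l (ps.map (· + d)) = pairKeys (l.drop d) ps := by
  intro ps
  induction ps using pairKeys.induct with
  | case1 p q r ih =>
    simp only [List.map_cons, pairKeys]
    rw [ih]
    have h1 : q + d - (p + d + 1) = q - (p + 1) := by omega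
    have h2 : p + d + 1 = d + (p + 1) := by omega
    rw [List.drop_drop, h1, h2]
  | case2 ps h =>
    match ps, h with
    | [], _ => rfl
    | [a], _ => rfl
    | a :: b :: u, h => exact absurd rfl (h a b u)

theorem pairSel_map {α β : Type} (f : α → β) : ∀ l : List α,
    (pairSel l).map f = pairSel (l.map f) := by
  intro l
  induction l using pairSel.induct with
  | case1 a b c r ih =>
    simp only [pairSel, List.map_cons] at ih ⊢
    rw [ih]
  | case2 l h =>
    match l, h with
    | [], _ => rfl
    | [a], _ => rfl
    | [a, b], _ => rfl
    | a :: b :: c :: u, h => exact absurd rfl (h a b c u)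

-- the main char-level bridge: A's paired-position keys = the pair-selected segments
theorem bridge : ∀ (n : Nat) (l : List Char), l.length ≤ n →
    pairKeys l (hashPos l) = pairSel (segsOf l) := by
  intro n
  induction n with
  | zero =>
    intro l h
    have : l = [] := List.length_eq_zero_iff.mp (by omega)
    subst this
    rfl
  | succ n ih =>
    intro l hl
    match l with
    | [] => rfl
    | c :: r =>
      by_cases hc : c = '#'
      · subst hc
        simp only [hashPos, segsOf, if_true]
        cases hr : hashPos r with
        | nil =>
          rw [segsOf_hashfree (hashPos_eq_nil hr)]
          rfl
        | cons q qs =>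
          obtain ⟨key, rest, e1, e2, e3, e4⟩ := hashPos_eq_cons hr
          have hmap : (qs.map (· + 1)) = (hashPos rest).map (· + (q + 2)) := by
            rw [e4, List.map_map]
            exact List.map_congr_left (by intro a _; simp; omega)
          rw [List.map_cons, hmap]
          simp only [pairKeys]
          have hkey : (('#' :: r).drop (0 + 1)).take (q + 1 - (0 + 1)) = key := by
            simp only [Nat.zero_add, List.drop_succ_cons, List.drop_zero, Nat.add_sub_cancel]
            rw [e1, ← e2, List.take_left]
          have hshift : pairKeys ('#' :: r) ((hashPos rest).map (· + (q + 2)))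
              = pairKeys rest (hashPos rest) := by
            rw [pairKeys_shift]
            congr 1
            rw [e1, show ('#' :: (key ++ '#' :: rest)) = ('#' :: key ++ ['#']) ++ rest by simp]
            rw [List.drop_left' (by simp [e2])]
          rw [hkey, hshift]
          conv_rhs => rw [e1, segsOf_append_hashfree e3]
          have hrest : rest.length ≤ n := by
            have := congrArg List.length e1
            simp at this
            simp at hl
            omega
          rw [ih rest hrest]
          cases hs : segsOf rest with
          | nil => exact absurd hs (segsOf_ne_nil rest)
          | cons s ss => simp only [pairSel]
      · simp only [hashPos, if_neg hc, segsOf]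
        have h1 : pairKeys (c :: r) ((hashPos r).map (· + 1)) = pairKeys r (hashPos r) := by
          rw [pairKeys_shift]
          rfl
        rw [h1, ih r (by simp at hl; omega)]
        cases hs : segsOf r with
        | nil => exact absurd hs (segsOf_ne_nil r)
        | cons s ss =>
          rw [List.modifyHead_cons]
          exact pairSel_head_irrel ss s (c :: s)

theorem range_filter_hash : ∀ l : List Char,
    (List.range l.length).filter (fun k => decide (l[k]? = some '#')) = hashPos l := by
  intro l
  induction l with
  | nil => simp [hashPos]
  | cons c t ih =>
    rw [List.length_cons, List.range_succ_eq_map, List.filter_cons]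
    have key : List.filter (fun k => decide ((c :: t)[k]? = some '#'))
        ((List.range t.length).map Nat.succ) = (hashPos t).map (· + 1) := by
      rw [List.filter_map]
      rw [List.filter_congr (q := fun k => decide (t[k]? = some '#'))
        (by intro k _; simp [Function.comp])]
      rw [ih]
    rw [key]
    simp only [hashPos]
    by_cases hc : c = '#'
    · rw [if_pos (by simp [hc]), if_pos hc]
    · rw [if_neg (by simp [hc]), if_neg hc]

-- A's first loop builds exactly the '#'-position list
theorem jing_pos_eq (l : List Char) :
    (PySem.List.pyRange 0 (l.length : Int) 1).foldl
      (fun acc i => if PySem.List.pyGet? l i = some '#' then acc ++ [i] else acc) []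
    = (hashPos l).map (Nat.cast : Nat → Int) := by
  rw [PySem.List.foldl_append_ite_eq_filter (fun i => PySem.List.pyGet? l i = some '#')]
  rw [PySem.List.pyRange_zero_natCast, List.filter_map]
  rw [List.filter_congr (q := fun k => decide (l[k]? = some '#'))
    (by intro k _; simp [Function.comp, PySem.List.pyGet?_natCast])]
  rw [range_filter_hash l]
  simp

-- A's second loop = pairKeysI, for any position list
theorem loopA (s : String) (jp : List Int) :
    ∀ (m k : Nat) (acc : List String), jp.length - k = m →
    (PySem.List.pyRange (k : Int) (jp.length : Int) 1).foldl
      (fun (st : Int × List String) i =>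
        if st.1 = 1 then (0, st.2)
        else if i + 1 = (jp.length : Int) then st
        else
          match PySem.List.pyGet? jp i, PySem.List.pyGet? jp (i + 1) with
          | some p, some q => (1, st.2 ++ [PySem.Str.slice s (some (p + 1)) (some q)])
          | _, _ => st)
      (0, acc)
    = (0, acc ++ pairKeysI s (jp.drop k)) := by
  intro m
  induction m using Nat.strong_induction_on with
  | _ m ih =>
    intro k acc hm
    match hd : jp.drop k with
    | [] =>
      have hk : jp.length ≤ k := by
        have := congrArg List.length hd; simp [List.length_drop] at this; omega
      rw [PySem.List.pyRange_of_pos _ _ (by omega), if_neg (by exact_mod_cast by omega)]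
      simp [pairKeysI]
    | [p] =>
      have hk : k + 1 = jp.length := by
        have := congrArg List.length hd; simp [List.length_drop] at this; omega
      rw [PySem.List.pyRange_one_cons (by exact_mod_cast by omega)]
      rw [List.foldl_cons]
      simp only [show (0 : Int) ≠ 1 by decide, reduceIte]
      rw [if_pos (by exact_mod_cast hk)]
      rw [show ((k : Int) + 1) = ((k + 1 : Nat) : Int) by omega, hk]
      rw [PySem.List.pyRange_of_pos _ _ (by omega), if_neg (by omega)]
      simp [pairKeysI]
    | p :: q :: r =>
      have hk : k + 2 ≤ jp.length := by
        have := congrArg List.length hd; simp [List.length_drop] at this; omega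
      have hp : PySem.List.pyGet? jp (k : Int) = some p := by
        rw [PySem.List.pyGet?_natCast]
        have h0 : (jp.drop k)[0]? = jp[k + 0]? := List.getElem?_drop
        rw [hd] at h0; simpa using h0.symm
      have hq : PySem.List.pyGet? jp ((k : Int) + 1) = some q := by
        rw [show ((k : Int) + 1) = ((k + 1 : Nat) : Int) by omega,
          PySem.List.pyGet?_natCast]
        have h1 : (jp.drop k)[1]? = jp[k + 1]? := List.getElem?_drop
        rw [hd] at h1; simpa using h1.symm
      rw [PySem.List.pyRange_one_cons (by exact_mod_cast by omega), List.foldl_cons]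
      simp only [show (0 : Int) ≠ 1 by decide, reduceIte]
      rw [if_neg (by intro h; exact absurd (by exact_mod_cast h : (k : Int) + 1 = (jp.length : Int)) (by omega))]
      rw [hp, hq]
      rw [PySem.List.pyRange_one_cons (by exact_mod_cast by omega), List.foldl_cons]
      simp only [reduceIte]
      rw [show ((k : Int) + 1 + 1) = ((k + 2 : Nat) : Int) by omega]
      rw [ih (m - 2) (by omega) (k + 2) _ (by omega)]
      have hdrop : jp.drop (k + 2) = r := by
        have h2 := congrArg (List.drop 2) hd
        rw [List.drop_drop] at h2
        simpa [show 2 + k = k + 2 by omega] using h2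
      rw [hdrop]
      simp [pairKeysI]

theorem pairKeysI_toList (s : String) : ∀ ps : List Nat,
    (pairKeysI s (ps.map (Nat.cast : Nat → Int))).map String.toList
    = pairKeys s.toList ps := by
  intro ps
  induction ps using pairKeys.induct with
  | case1 p q r ih =>
    simp only [List.map_cons, pairKeysI, pairKeys]
    rw [ih]
    congr 1
    rw [PySem.Str.toList_slice]
    simp only [PySem.Chars.slice_eq_listSlice]
    rw [show ((p : Int) + 1) = ((p + 1 : Nat) : Int) by omega]
    rw [PySem.List.slice_natCast]
  | case2 ps h =>
    match ps, h with
    | [], _ => rfl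
    | [a], _ => rfl
    | a :: b :: u, h => exact absurd rfl (h a b u)

theorem pyRange_two_nil {a b : Int} (h : b ≤ a) : PySem.List.pyRange a b 2 = [] := by
  rw [PySem.List.pyRange_of_pos a b (by omega), if_neg (by omega)]
  simp

theorem pyRange_two_cons {a b : Int} (h : a < b) :
    PySem.List.pyRange a b 2 = a :: PySem.List.pyRange (a + 2) b 2 := by
  rw [PySem.List.pyRange_of_pos a b (by omega), PySem.List.pyRange_of_pos (a+2) b (by omega)]
  rw [if_pos h]
  by_cases h2 : a + 2 < b
  · rw [if_pos h2]
    have hc : ((b - a + 2 - 1) / 2).toNat = ((b - (a+2) + 2 - 1) / 2).toNat + 1 := by omega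
    rw [hc, List.range_succ_eq_map]
    simp only [List.map_cons, List.map_map]
    congr 1
    · simp
    · apply List.map_congr_left
      intro k _
      simp [Function.comp, Nat.succ_eq_add_one]
      ring
  · rw [if_neg h2]
    have hc : ((b - a + 2 - 1) / 2).toNat = 1 := by omega
    rw [hc]
    simp

-- B's comprehension over range(1, len(parts)-1, 2) = pairSel
theorem loopB (parts : List String) :
    ∀ (m k : Nat), parts.length - k = m →
    (PySem.List.pyRange ((k : Int) + 1) ((parts.length : Int) - 1) 2).map
      (fun i => (PySem.List.pyGet? parts i).getD "")
    = pairSel (parts.drop k) := by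
  intro m
  induction m using Nat.strong_induction_on with
  | _ m ih =>
    intro k hm
    match hd : parts.drop k with
    | [] =>
      have hk : parts.length ≤ k := by
        have := congrArg List.length hd; simp [List.length_drop] at this; omega
      rw [pyRange_two_nil (by omega)]
      rfl
    | [a] =>
      have hk : k + 1 = parts.length := by
        have := congrArg List.length hd; simp [List.length_drop] at this; omega
      rw [pyRange_two_nil (by omega)]
      rfl
    | [a, b] =>
      have hk : k + 2 = parts.length := by
        have := congrArg List.length hd; simp [List.length_drop] at this; omega
      rw [pyRange_two_nil (by omega)]
      rfl
    | a :: b :: c :: r =>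
      have hk : k + 3 ≤ parts.length := by
        have := congrArg List.length hd; simp [List.length_drop] at this; omega
      have hb : PySem.List.pyGet? parts ((k : Int) + 1) = some b := by
        rw [show ((k : Int) + 1) = ((k + 1 : Nat) : Int) by omega, PySem.List.pyGet?_natCast]
        have h1 : (parts.drop k)[1]? = parts[k + 1]? := List.getElem?_drop
        rw [hd] at h1; simpa using h1.symm
      rw [pyRange_two_cons (by omega), List.map_cons, hb]
      rw [show ((k : Int) + 1 + 2) = ((k + 2 : Nat) : Int) + 1 by omega]
      rw [ih (m - 2) (by omega) (k + 2) (by omega)]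
      have hdrop : parts.drop (k + 2) = c :: r := by
        have h2 := congrArg (List.drop 2) hd
        rw [List.drop_drop] at h2
        simpa [show 2 + k = k + 2 by omega] using h2
      rw [hdrop]
      simp [Option.getD, pairSel]

-- splitOn.go computes segsOf
theorem splitOn_go_spec : ∀ (fuel : Nat) (l cur : List Char) (acc : List (List Char)),
    l.length < fuel →
    PySem.Chars.splitOn.go ['#'] fuel l cur acc
    = acc.reverse ++ (segsOf l).modifyHead (cur.reverse ++ ·) := by
  intro fuel
  induction fuel with
  | zero => intro l cur acc h; omega
  | succ n ih =>
    intro l cur acc h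
    cases l with
    | nil => simp [PySem.Chars.splitOn.go, segsOf]
    | cons c rest =>
      rw [PySem.Chars.splitOn.go]
      by_cases hc : c = '#'
      · rw [if_pos (by simp [hc, List.isPrefixOf])]
        simp only [List.length_cons, List.drop_succ_cons, List.length_nil, List.drop_zero]
        rw [ih rest [] (cur.reverse :: acc) (by simp at h; omega)]
        simp [segsOf, hc]
        cases hs : segsOf rest with
        | nil => exact absurd hs (segsOf_ne_nil rest)
        | cons s ss => simp
      · rw [if_neg (by simp [List.isPrefixOf]; exact fun e => hc e.symm)]
        rw [ih rest (c :: cur) acc (by simp at h; omega)]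
        simp only [segsOf, if_neg hc]
        cases hs : segsOf rest with
        | nil => exact absurd hs (segsOf_ne_nil rest)
        | cons s ss => simp

theorem splitOn_eq_segsOf (l : List Char) : PySem.Chars.splitOn l ['#'] = segsOf l := by
  rw [PySem.Chars.splitOn, splitOn_go_spec (l.length + 1) l [] [] (by omega)]
  cases hs : segsOf l with
  | nil => exact absurd hs (segsOf_ne_nil l)
  | cons s ss => simp

-- ===== VERDICT (by name: the statement is the Claim_ definition above) =====
theorem get_key_list_spec : Claim_equal_get_key_list := by
  intro string _
  unfold Spec_get_key_list get_key_list get_key_list_alt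
  dsimp only
  -- A's side
  set l := string.toList with hldef
  rw [jing_pos_eq l]
  set hp := hashPos l with hpdef
  have hA := loopA string (hp.map (Nat.cast : Nat → Int)) (hp.map (Nat.cast : Nat → Int)).length 0 []
    (by omega)
  simp only [Nat.cast_zero, List.drop_zero] at hA
  rw [hA]
  -- B's side
  have hsplit : ∃ parts, PySem.Str.split? string "#" = some parts ∧
      parts.map String.toList = segsOf l := by
    have hm := PySem.Str.split?_map string "#"
    rw [show ("#" : String).toList = ['#'] by rfl] at hm
    rw [PySem.Chars.split?] at hm
    rw [if_neg (by simp)] at hm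
    rw [splitOn_eq_segsOf] at hm
    cases hsp : PySem.Str.split? string "#" with
    | none => rw [hsp] at hm; simp at hm
    | some parts =>
      rw [hsp] at hm
      exact ⟨parts, rfl, by simpa using hm⟩
  obtain ⟨parts, hps, hpl⟩ := hsplit
  rw [hps]
  simp only [Option.getD_some]
  have hB := loopB parts parts.length 0 (by omega)
  simp only [Nat.cast_zero, List.drop_zero, zero_add] at hB
  rw [hB]
  -- both sides through char lists
  apply List.map_injective_iff.mpr (fun a b hab => String.toList_inj.mp hab)
  simp only [List.nil_append]
  calc (pairKeysI string (hp.map (Nat.cast : Nat → Int))).map String.toList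
      = pairKeys l hp := pairKeysI_toList string hp
    _ = pairSel (segsOf l) := bridge l.length l (le_refl _)
    _ = pairSel (parts.map String.toList) := by rw [hpl]
    _ = (pairSel parts).map String.toList := (pairSel_map String.toList parts).symm
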